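-- pv_equiv track=rewrite | github.com/NickQ2003/my_llm | backend/env/main_cloud.py | generar_ruta_investigacion
-- ===== SOURCE A (Python) =====
-- from typing import Optional, Dict, Any, List
--
-- def generar_ruta_investigacion(eventos: List[Dict[str, Any]], inicio: str, fin: str) -> List[str]:
--     from collections import defaultdict
--     grafo = defaultdict(list)
--     for e in eventos:
--         grafo[e["origen"]].append(e["destino"])
--     visitado = set()
--     def dfs(nodo, objetivo, camino):
--         if nodo == objetivo:
--             return camino + [nodo]
--         visitado.add(nodo)
--         for vecino in grafo.get(nodo, []):
--             if vecino not in visitado: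
--                 resultado = dfs(vecino, objetivo, camino + [nodo])
--                 if resultado:
--                     return resultado
--         visitado.remove(nodo)
--         return None
--     return dfs(inicio, fin, []) or []
-- ===== SOURCE B (Python) =====
-- def generar_ruta_investigacion(eventos, inicio, fin):
--     def vecinos(nodo):
--         return [e["destino"] for e in eventos if e["origen"] == nodo]
--
--     def buscar(nodo, antecesores):
--         if nodo == fin:
--             return [nodo]
--         for v in vecinos(nodo):
--             if v != nodo and v not in antecesores:
--                 r = buscar(v, antecesores | {nodo})
--                 if r is not None:
--                     return [nodo] + r
--         return None
--
--     r = buscar(inicio, frozenset())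
--     return r if r is not None else []
-- ===== Notes on version B (the rewrite author's own statement) =====
-- stated objective: simpler
-- what changed: B drops A's prebuilt adjacency defaultdict and the global mutable visited-set with backtracking removal: it scans eventos on demand for a node's neighbours, passes an immutable ancestor set down the recursion, and builds the path by prepending on return instead of threading a path accumulator; Pre_ excludes events missing the 'origen' or 'destino' key, on which A raises KeyError.
import Mathlib
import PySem

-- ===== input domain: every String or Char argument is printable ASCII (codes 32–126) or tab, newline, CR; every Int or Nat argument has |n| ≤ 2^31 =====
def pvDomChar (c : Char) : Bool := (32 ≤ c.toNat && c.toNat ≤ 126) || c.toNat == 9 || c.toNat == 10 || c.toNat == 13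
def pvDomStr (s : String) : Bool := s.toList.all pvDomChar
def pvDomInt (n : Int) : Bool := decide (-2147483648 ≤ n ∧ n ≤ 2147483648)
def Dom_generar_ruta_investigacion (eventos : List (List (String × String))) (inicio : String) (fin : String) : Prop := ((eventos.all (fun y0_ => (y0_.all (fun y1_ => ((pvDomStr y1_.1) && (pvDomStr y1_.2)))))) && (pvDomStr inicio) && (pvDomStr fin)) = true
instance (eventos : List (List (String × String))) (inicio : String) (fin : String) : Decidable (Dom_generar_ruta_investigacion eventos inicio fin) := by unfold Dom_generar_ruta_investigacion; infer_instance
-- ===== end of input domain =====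

-- B replaces A's prebuilt adjacency dict and global mutable visited-set (with backtracking removal)
-- by an on-demand neighbour scan, an immutable ancestor set passed down, and a path built by
-- prepending on return (objective: simpler). Same first-found DFS path.

-- e["k"]: first-match lookup; total stand-in (Pre_ excludes the KeyError case of a missing key)
def pvField (e : List (String × String)) (k : String) : String :=
  ((PySem.Dict.mk e).get? k).getD ""

-- ===== PORT A =====
-- grafo = defaultdict(list); for e in eventos: grafo[e["origen"]].append(e["destino"])
def grafoA (eventos : List (List (String × String))) : PySem.Dict String (List String) :=
  eventos.foldl (fun g e => g.modify (pvField e "origen") [] (· ++ [pvField e "destino"]))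
    PySem.Dict.empty

-- the 'for vecino in grafo.get(nodo, [])' loop of dfs; state = (result, visitado);
-- 'if resultado:' is is-some, as resultado is None or the nonempty list camino+[nodo]+…
def loopA (rec : String → List String → PySem.Set String →
      Option (List String) × PySem.Set String) :
    List String → String → List String → PySem.Set String →
      Option (List String) × PySem.Set String
  | [], _, _, vis => (none, vis)
  | v :: vs, nodo, camino, vis =>
    if ¬ (v ∈ vis) then
      match rec v (camino ++ [nodo]) vis with
      | (some r, vis') => (some r, vis')
      | (none, vis') => loopA rec vs nodo camino vis'
    else loopA rec vs nodo camino vis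

-- dfs(nodo, objetivo, camino) with visitado threaded; fuel only guards totality (the Python
-- recursion depth is the path length, ≤ eventos.length + 2, so the fuel supplied below never
-- runs out; nothing about that is claimed).  visitado.remove(nodo): remove? never fails here.
def dfsA (g : PySem.Dict String (List String)) (objetivo : String) :
    Nat → String → List String → PySem.Set String →
      Option (List String) × PySem.Set String
  | 0, _, _, vis => (none, vis)
  | f + 1, nodo, camino, vis =>
    if nodo = objetivo then (some (camino ++ [nodo]), vis)
    else
      match loopA (dfsA g objetivo f) (g.getD nodo []) nodo camino (PySem.Set.add vis nodo) with
      | (some r, vis') => (some r, vis')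
      | (none, vis') => (none, (PySem.Set.remove? vis' nodo).getD vis')

-- return dfs(inicio, fin, []) or []   (dfs yields None or a nonempty list, so 'or []' = getD [])
def generar_ruta_investigacion (eventos : List (List (String × String))) (inicio : String)
    (fin : String) : List String :=
  ((dfsA (grafoA eventos) fin (eventos.length + 2) inicio [] PySem.Set.empty).1).getD []

-- ===== PORT B =====
-- [e["destino"] for e in eventos if e["origen"] == nodo]
def vecinosB (eventos : List (List (String × String))) (nodo : String) : List String :=
  (eventos.filter (fun e => pvField e "origen" == nodo)).map (fun e => pvField e "destino")

-- the 'for v in vecinos(nodo)' loop of buscar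
def loopB (rec : String → PySem.Set String → Option (List String)) :
    List String → String → PySem.Set String → Option (List String)
  | [], _, _ => none
  | v :: vs, nodo, ant =>
    if v ≠ nodo ∧ ¬ (v ∈ ant) then
      match rec v (PySem.Set.union ant (PySem.Set.ofList [nodo])) with
      | some r => some (nodo :: r)
      | none => loopB rec vs nodo ant
    else loopB rec vs nodo ant

-- buscar(nodo, antecesores); fuel guards totality exactly as in port A
def buscarB (eventos : List (List (String × String))) (fin : String) :
    Nat → String → PySem.Set String → Option (List String)
  | 0, _, _ => none
  | f + 1, nodo, ant =>
    if nodo = fin then some [nodo]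
    else loopB (buscarB eventos fin f) (vecinosB eventos nodo) nodo ant

def generar_ruta_investigacion_alt (eventos : List (List (String × String))) (inicio : String)
    (fin : String) : List String :=
  (buscarB eventos fin (eventos.length + 2) inicio PySem.Set.empty).getD []

-- ===== PRECONDITION & SPEC =====
-- Pre_ excludes exactly the inputs where A raises KeyError: an event without an "origen"
-- or "destino" key.
def Pre_generar_ruta_investigacion (eventos : List (List (String × String))) (inicio : String) (fin : String) : Prop :=
  ∀ e ∈ eventos, ((PySem.Dict.mk e).get? "origen").isSome = true ∧
    ((PySem.Dict.mk e).get? "destino").isSome = true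

instance (eventos : List (List (String × String))) (inicio : String) (fin : String) : Decidable (Pre_generar_ruta_investigacion eventos inicio fin) := by unfold Pre_generar_ruta_investigacion; infer_instance

def pvWitness_generar_ruta_investigacion : (List (List (String × String))) × String × String :=
  ([[("origen", "a"), ("destino", "b")], [("origen", "b"), ("destino", "c")]], "a", "c")

def Spec_generar_ruta_investigacion (eventos : List (List (String × String))) (inicio : String) (fin : String) (out : List String) : Prop := out = generar_ruta_investigacion_alt eventos inicio fin
instance (eventos : List (List (String × String))) (inicio : String) (fin : String) (out : List String) : Decidable (Spec_generar_ruta_investigacion eventos inicio fin out) := by unfold Spec_generar_ruta_investigacion; infer_instance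

-- ===== CLAIM (what is proved, stated in full; the proofs are below) =====
def Claim_equal_generar_ruta_investigacion : Prop := ∀ (eventos : List (List (String × String))) (inicio : String) (fin : String), Dom_generar_ruta_investigacion eventos inicio fin → Pre_generar_ruta_investigacion eventos inicio fin → Spec_generar_ruta_investigacion eventos inicio fin (generar_ruta_investigacion eventos inicio fin)

-- ===== LEMMAS AND PROOFS =====


theorem pv_discard_append (s : List String) (x : String) (h : x ∉ s) :
    PySem.Set.discard (s ++ [x]) x = s := by
  simp only [PySem.Set.discard, List.filter_append, List.filter_cons, List.filter_nil]
  simp only [beq_self_eq_true, Bool.not_true, Bool.false_eq_true, if_false, List.append_nil]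
  rw [List.filter_eq_self]
  intro a ha; simp; rintro rfl; exact h ha

theorem pv_remove_restore (s : List String) (x : String) (h : x ∉ s) :
    PySem.Set.remove? (s ++ [x]) x = some s := by
  rw [PySem.Set.remove?_of_mem (by simp)]
  rw [pv_discard_append s x h]

theorem pv_ofList_snoc (xs : List String) (x : String) :
    PySem.Set.ofList (xs ++ [x]) = PySem.Set.add (PySem.Set.ofList xs) x := by
  simp [PySem.Set.ofList_eq_foldl, List.foldl_append]

theorem pv_union_singleton (s : PySem.Set String) (x : String) :
    PySem.Set.union s (PySem.Set.ofList [x]) = PySem.Set.add s x := rfl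

theorem pv_nb (ev : List (List (String × String))) (n : String) :
    (grafoA ev).getD n [] = vecinosB ev n := by
  unfold grafoA vecinosB
  have h : ev.foldl (fun g e => g.modify (pvField e "origen") [] (· ++ [pvField e "destino"])) PySem.Dict.empty
      = (ev.map (fun e => (pvField e "origen", pvField e "destino"))).foldl
          (fun d p => d.modify p.1 [] (· ++ [p.2])) PySem.Dict.empty := by
    rw [List.foldl_map]
  rw [h, PySem.Dict.getD_foldl_modify_append]
  simp [List.filter_map, List.map_map, Function.comp_def]

theorem pv_main (ev : List (List (String × String))) (fin : String) (f : Nat) :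
    ∀ nodo camino, nodo ∉ camino →
      (dfsA (grafoA ev) fin f nodo camino (PySem.Set.ofList camino)).1
        = (buscarB ev fin f nodo (PySem.Set.ofList camino)).map (fun r => camino ++ r)
      ∧ (buscarB ev fin f nodo (PySem.Set.ofList camino) = none →
          (dfsA (grafoA ev) fin f nodo camino (PySem.Set.ofList camino)).2 = PySem.Set.ofList camino) := by
  induction f with
  | zero => intro nodo camino _; simp [dfsA, buscarB]
  | succ f IH =>
    have loop : ∀ (vs : List String) (nodo : String) (camino : List String), nodo ∉ camino →
        (loopA (dfsA (grafoA ev) fin f) vs nodo camino (PySem.Set.ofList (camino ++ [nodo]))).1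
          = (loopB (buscarB ev fin f) vs nodo (PySem.Set.ofList camino)).map (fun r => camino ++ r)
        ∧ (loopB (buscarB ev fin f) vs nodo (PySem.Set.ofList camino) = none →
            (loopA (dfsA (grafoA ev) fin f) vs nodo camino (PySem.Set.ofList (camino ++ [nodo]))).2
              = PySem.Set.ofList (camino ++ [nodo])) := by
      intro vs
      induction vs with
      | nil => intro nodo camino _; simp [loopA, loopB]
      | cons v vs ihvs =>
        intro nodo camino h
        by_cases hv : v ∈ camino ++ [nodo]
        · -- both guards reject v
          have hA : ¬ ¬ (v ∈ PySem.Set.ofList (camino ++ [nodo])) := by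
            rw [PySem.Set.mem_ofList]; exact not_not_intro hv
          have hB : ¬ (v ≠ nodo ∧ ¬ (v ∈ PySem.Set.ofList camino)) := by
            rw [PySem.Set.mem_ofList]
            rcases List.mem_append.1 hv with h1 | h1
            · exact fun hc => hc.2 h1
            · exact fun hc => hc.1 (by simpa using h1)
          simp only [loopA, loopB, if_neg hA, if_neg hB]
          exact ihvs nodo camino h
        · -- both guards accept v
          have hvn : v ≠ nodo := by simp at hv; tauto
          have hvc : v ∉ camino := by simp at hv; tauto
          have hA : ¬ (v ∈ PySem.Set.ofList (camino ++ [nodo])) := by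
            rw [PySem.Set.mem_ofList]; exact hv
          have hB : v ≠ nodo ∧ ¬ (v ∈ PySem.Set.ofList camino) := by
            rw [PySem.Set.mem_ofList]; exact ⟨hvn, hvc⟩
          simp only [loopA, loopB, if_pos hA, if_pos hB, pv_union_singleton, ← pv_ofList_snoc]
          obtain ⟨c1, c2⟩ := IH v (camino ++ [nodo]) hv
          rcases hd : dfsA (grafoA ev) fin f v (camino ++ [nodo])
              (PySem.Set.ofList (camino ++ [nodo])) with ⟨o, vis'⟩
          rw [hd] at c1 c2
          cases hb : buscarB ev fin f v (PySem.Set.ofList (camino ++ [nodo])) with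
          | some r =>
            rw [hb] at c1; simp at c1
            subst c1
            simp
          | none =>
            rw [hb] at c1 c2; simp at c1 c2
            subst c1; subst c2
            exact ihvs nodo camino h
    intro nodo camino h
    by_cases hfin : nodo = fin
    · simp [dfsA, buscarB, hfin]
    · simp only [dfsA, buscarB, if_neg hfin, pv_nb, ← pv_ofList_snoc]
      obtain ⟨l1, l2⟩ := loop (vecinosB ev nodo) nodo camino h
      rcases hl : loopA (dfsA (grafoA ev) fin f) (vecinosB ev nodo) nodo camino
          (PySem.Set.ofList (camino ++ [nodo])) with ⟨o, vis'⟩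
      rw [hl] at l1 l2
      cases hb : loopB (buscarB ev fin f) (vecinosB ev nodo) nodo (PySem.Set.ofList camino) with
      | some rb =>
        rw [hb] at l1; simp at l1
        subst l1
        simp
      | none =>
        rw [hb] at l1 l2; simp at l1 l2
        subst l1; subst l2
        have hnm : nodo ∉ PySem.Set.ofList camino := by rw [PySem.Set.mem_ofList]; exact h
        constructor
        · simp
        · intro _
          show ((PySem.Set.ofList (camino ++ [nodo])).remove? nodo).getD
              (PySem.Set.ofList (camino ++ [nodo])) = PySem.Set.ofList camino
          rw [show PySem.Set.ofList (camino ++ [nodo]) = PySem.Set.ofList camino ++ [nodo] by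
                rw [pv_ofList_snoc, PySem.Set.add_of_not_mem hnm]]
          rw [pv_remove_restore _ _ hnm]
          rfl

-- ===== VERDICT (by name: the statement is the Claim_ definition above) =====
theorem generar_ruta_investigacion_spec : Claim_equal_generar_ruta_investigacion := by
  intro ev inicio fin _ _
  unfold Spec_generar_ruta_investigacion generar_ruta_investigacion generar_ruta_investigacion_alt
  have h := (pv_main ev fin (ev.length + 2) inicio [] (by simp)).1
  rw [show (PySem.Set.empty : PySem.Set String) = PySem.Set.ofList [] from rfl, h]
  cases buscarB ev fin (ev.length + 2) inicio (PySem.Set.ofList []) <;> simp
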